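-- pv_equiv track=rewrite | github.com/MichelleWillaQu/Code-Challenges | lazy-lemmings/lemmings.py | furthest_optimized
-- ===== SOURCE A (Python) =====
-- def furthest_optimized(num_holes, cafes):
--     """Find longest distance between a hole and a cafe."""
--     max_distance = 0
--     lemming_distance = None
--     if len(cafes) == 1:
--         dist_to_end = num_holes - 1 - cafes[0]
--         return dist_to_end if dist_to_end > cafes[0] else cafes[0]
--     # If more than one
--     # Because equal or less number of cafes to holes
--     for idx, cafe in enumerate(cafes):
--         if idx == 0:
--             dist_to_right = (cafes[1] - cafe) // 2
--             lemming_distance = dist_to_right if dist_to_right > cafe else cafe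
--         elif idx == len(cafes) - 1:
--             dist_to_left = (cafe - cafes[idx - 1]) // 2
--             dist_to_right = num_holes - 1 - cafe
--             lemming_distance = dist_to_left if dist_to_right < dist_to_left else dist_to_right
--         else:
--             dist_to_left = (cafe - cafes[idx - 1]) // 2
--             dist_to_right = (cafes[idx + 1] - cafe) // 2
--             lemming_distance = dist_to_left if dist_to_right < dist_to_left else dist_to_right
--         if lemming_distance > max_distance:
--             max_distance = lemming_distance
--     return max_distance
-- ===== SOURCE B (Python) =====
-- def furthest_optimized(num_holes, cafes):
--     """Find longest distance between a hole and a cafe."""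
--     if not cafes:
--         return 0
--     if len(cafes) == 1:
--         return max(cafes[0], num_holes - 1 - cafes[0])
--
--     def gaps_max(lo, hi):
--         # max of (cafes[i+1] - cafes[i]) // 2 over lo <= i < hi, by divide and conquer
--         if hi <= lo + 1:
--             return (cafes[lo + 1] - cafes[lo]) // 2
--         mid = (lo + hi) // 2
--         return max(gaps_max(lo, mid), gaps_max(mid, hi))
--
--     return max(0, cafes[0], gaps_max(0, len(cafes) - 1), num_holes - 1 - cafes[-1])
-- ===== Notes on version B (the rewrite author's own statement) =====
-- stated objective: alternative
-- what changed: Replaces A's single indexed loop with positional idx==0/idx==last/middle branching by a divide-and-conquer recursion that computes the maximum consecutive half-gap by splitting the index range in halves, combined with the two endpoint distances in one final max; empty and single-cafe cases are handled up front.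
import Mathlib
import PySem

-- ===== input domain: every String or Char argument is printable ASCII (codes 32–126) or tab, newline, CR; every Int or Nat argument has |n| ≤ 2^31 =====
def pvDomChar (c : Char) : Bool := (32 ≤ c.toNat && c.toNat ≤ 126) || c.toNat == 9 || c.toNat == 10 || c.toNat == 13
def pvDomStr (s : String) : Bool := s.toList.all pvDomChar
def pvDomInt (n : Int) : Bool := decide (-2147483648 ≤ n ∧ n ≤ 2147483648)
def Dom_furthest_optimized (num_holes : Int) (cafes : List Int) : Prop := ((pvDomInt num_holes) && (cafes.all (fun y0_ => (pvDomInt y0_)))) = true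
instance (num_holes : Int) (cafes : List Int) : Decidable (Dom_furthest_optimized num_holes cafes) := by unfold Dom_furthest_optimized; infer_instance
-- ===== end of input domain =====

-- B replaces A's indexed loop with positional branching by a divide-and-conquer
-- recursion over the index range for the maximum consecutive half-gap, combined with
-- the two endpoint distances in one final max (objective: alternative).

-- ===== PORT A =====
-- loop body of A (the lemming_distance computed for one (idx, cafe) pair), kept as a named helper
def pvLemA (num_holes : Int) (cafes : List Int) (idx : Int) (cafe : Int) : Int :=
  if idx == 0 then
    let dist_to_right := PySem.Int.floordiv (PySem.List.pyGetD cafes 1 0 - cafe) 2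
    if dist_to_right > cafe then dist_to_right else cafe
  else if idx == (cafes.length : Int) - 1 then
    let dist_to_left := PySem.Int.floordiv (cafe - PySem.List.pyGetD cafes (idx - 1) 0) 2
    let dist_to_right := num_holes - 1 - cafe
    if dist_to_right < dist_to_left then dist_to_left else dist_to_right
  else
    let dist_to_left := PySem.Int.floordiv (cafe - PySem.List.pyGetD cafes (idx - 1) 0) 2
    let dist_to_right := PySem.Int.floordiv (PySem.List.pyGetD cafes (idx + 1) 0 - cafe) 2
    if dist_to_right < dist_to_left then dist_to_left else dist_to_right

def furthest_optimized (num_holes : Int) (cafes : List Int) : Int :=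
  if cafes.length == 1 then
    let c0 := PySem.List.pyGetD cafes 0 0
    let dist_to_end := num_holes - 1 - c0
    if dist_to_end > c0 then dist_to_end else c0
  else
    (PySem.List.enumerate cafes 0).foldl
      (fun max_distance p =>
        let lemming_distance := pvLemA num_holes cafes p.1 p.2
        if lemming_distance > max_distance then lemming_distance else max_distance) 0

-- ===== PORT B =====
-- Source B's inner helper gaps_max: divide-and-conquer max of (cafes[i+1]-cafes[i])//2 over lo ≤ i < hi
def pvGapsMax (cafes : List Int) (lo hi : Nat) : Int :=
  if hi ≤ lo + 1 then
    PySem.Int.floordiv (cafes.getD (lo + 1) 0 - cafes.getD lo 0) 2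
  else
    let mid := (lo + hi) / 2
    max (pvGapsMax cafes lo mid) (pvGapsMax cafes mid hi)
termination_by hi - lo
decreasing_by all_goals omega

def furthest_optimized_alt (num_holes : Int) (cafes : List Int) : Int :=
  if cafes.isEmpty then 0
  else if cafes.length == 1 then
    max (cafes.headD 0) (num_holes - 1 - cafes.headD 0)
  else
    max 0 (max (cafes.headD 0)
      (max (pvGapsMax cafes 0 (cafes.length - 1)) (num_holes - 1 - cafes.getLastD 0)))

-- ===== PRECONDITION & SPEC =====
def Spec_furthest_optimized (num_holes : Int) (cafes : List Int) (out : Int) : Prop := out = furthest_optimized_alt num_holes cafes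
instance (num_holes : Int) (cafes : List Int) (out : Int) : Decidable (Spec_furthest_optimized num_holes cafes out) := by unfold Spec_furthest_optimized; infer_instance

-- ===== CLAIM (what is proved, stated in full; the proofs are below) =====
def Claim_equal_furthest_optimized : Prop := ∀ (num_holes : Int) (cafes : List Int), Dom_furthest_optimized num_holes cafes → Spec_furthest_optimized num_holes cafes (furthest_optimized num_holes cafes)

-- ===== LEMMAS AND PROOFS =====

-- the consecutive half-gap at index j, stated with the same getD's as pvGapsMax's base case
def pvGap (cafes : List Int) (j : Nat) : Int :=
  PySem.Int.floordiv (cafes.getD (j + 1) 0 - cafes.getD j 0) 2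

theorem pv_foldl_max_le (l : List Int) (a b : Int) (ha : a ≤ b)
    (h : ∀ x ∈ l, x ≤ b) : l.foldl max a ≤ b := by
  induction l generalizing a with
  | nil => exact ha
  | cons x t ih =>
    exact ih (max a x) (max_le ha (h x List.mem_cons_self)) fun y hy => h y (List.mem_cons_of_mem _ hy)

-- A's loop is a running max of pvLemA over the enumerated list
theorem pv_foldA_eq (num_holes : Int) (cafes : List Int) :
    (PySem.List.enumerate cafes 0).foldl
      (fun max_distance p =>
        let lemming_distance := pvLemA num_holes cafes p.1 p.2
        if lemming_distance > max_distance then lemming_distance else max_distance) 0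
    = ((PySem.List.enumerate cafes 0).map (fun p => pvLemA num_holes cafes p.1 p.2)).foldl max 0 := by
  rw [List.foldl_map]
  congr 1; funext m p; simp only []; split <;> omega

-- closed form of pvLemA at a valid index of a list with at least two elements
theorem pv_lemA_eq (num_holes : Int) (L : List Int) (k : Nat) (h2 : 2 ≤ L.length) (hk : k < L.length) :
    pvLemA num_holes L (k : Int) L[k] =
      if k = 0 then max (PySem.Int.floordiv (L[1] - L[0]) 2) L[0]
      else if hl : k = L.length - 1 then
        max (PySem.Int.floordiv (L[k] - L[k-1]) 2) (num_holes - 1 - L[k])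
      else max (PySem.Int.floordiv (L[k] - L[k-1]) 2)
        (PySem.Int.floordiv (L[k+1]'(by omega) - L[k]) 2) := by
  unfold pvLemA
  by_cases h0 : k = 0
  · subst h0
    rw [PySem.List.pyGetD_ofNat' L 1 0, List.getD_eq_getElem L 0 (show 1 < L.length by omega)]
    simp only [Nat.cast_zero, beq_self_eq_true, if_true]
    split_ifs <;> omega
  · have hge : 1 ≤ k := by omega
    have hc1 : ((k : Int) == 0) = false := by simp; omega
    have hsub : ((k : Int) - 1) = ((k - 1 : Nat) : Int) := by push_cast [hge]; ring
    rw [hc1]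
    simp only [Bool.false_eq_true, if_false]
    by_cases hl : k = L.length - 1
    · have hc2 : ((k : Int) == (L.length : Int) - 1) = true := by simp; omega
      rw [hc2, hsub, PySem.List.pyGetD_natCast,
        List.getD_eq_getElem L 0 (show k - 1 < L.length by omega)]
      simp only [if_true, if_neg h0, dif_pos hl]
      split_ifs <;> omega
    · have hc2 : ((k : Int) == (L.length : Int) - 1) = false := by simp; omega
      have hadd : ((k : Int) + 1) = ((k + 1 : Nat) : Int) := by push_cast; ring
      rw [hc2, hsub, hadd, PySem.List.pyGetD_natCast, PySem.List.pyGetD_natCast,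
        List.getD_eq_getElem L 0 (show k - 1 < L.length by omega),
        List.getD_eq_getElem L 0 (show k + 1 < L.length by omega)]
      simp only [Bool.false_eq_true, if_false, if_neg h0, dif_neg hl]
      split_ifs <;> omega

-- each consecutive half-gap is a member of the zip-map gap list
theorem pv_gap_mem (L : List Int) (j : Nat) (hj : j + 1 < L.length) :
    PySem.Int.floordiv (L[j+1] - L[j]) 2 ∈
      (L.zip L.tail).map (fun p => PySem.Int.floordiv (p.2 - p.1) 2) := by
  have hlen : j < (L.zip L.tail).length := by
    simp only [List.length_zip, List.length_tail]; omega
  refine List.mem_map.2 ⟨(L[j], L[j+1]), ?_, rfl⟩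
  have hmem := List.getElem_mem hlen
  rwa [List.getElem_zip, List.getElem_tail] at hmem

-- every member of the zip-map gap list is a consecutive half-gap
theorem pv_gap_mem_inv (L : List Int) (x : Int)
    (hx : x ∈ (L.zip L.tail).map (fun p => PySem.Int.floordiv (p.2 - p.1) 2)) :
    ∃ (j : Nat) (hj : j + 1 < L.length),
      x = PySem.Int.floordiv (L[j+1] - L[j]) 2 := by
  rcases List.mem_map.1 hx with ⟨p, hp, hfx⟩
  rcases List.mem_iff_getElem.1 hp with ⟨j, hjl, hpj⟩
  have hj : j + 1 < L.length := by
    simp only [List.length_zip, List.length_tail] at hjl; omega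
  refine ⟨j, hj, ?_⟩
  rw [List.getElem_zip, List.getElem_tail] at hpj
  rw [← hfx, ← hpj]

-- pvGap in terms of getElem, at an in-range index
theorem pv_gap_eq (L : List Int) (j : Nat) (hj : j + 1 < L.length) :
    pvGap L j = PySem.Int.floordiv (L[j+1] - L[j]) 2 := by
  unfold pvGap
  rw [List.getD_eq_getElem L 0 hj, List.getD_eq_getElem L 0 (by omega)]

-- pvGapsMax attains one of the gaps of its range
theorem pv_gapsMax_exists (cafes : List Int) (d : Nat) :
    ∀ lo hi, hi - lo ≤ d → lo < hi →
      ∃ j, lo ≤ j ∧ j < hi ∧ pvGapsMax cafes lo hi = pvGap cafes j := by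
  induction d with
  | zero => intro lo hi h hlt; omega
  | succ d ih =>
    intro lo hi h hlt
    unfold pvGapsMax
    by_cases hb : hi ≤ lo + 1
    · rw [if_pos hb]; exact ⟨lo, le_refl _, hlt, rfl⟩
    · rw [if_neg hb]
      rcases ih lo ((lo + hi) / 2) (by omega) (by omega) with ⟨j1, hj1a, hj1b, hj1⟩
      rcases ih ((lo + hi) / 2) hi (by omega) (by omega) with ⟨j2, hj2a, hj2b, hj2⟩
      rcases max_choice (pvGapsMax cafes lo ((lo + hi) / 2)) (pvGapsMax cafes ((lo + hi) / 2) hi) with hc | hc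
      · refine ⟨j1, hj1a, by omega, ?_⟩
        show max (pvGapsMax cafes lo ((lo + hi) / 2)) (pvGapsMax cafes ((lo + hi) / 2) hi) = _
        rw [hc, hj1]
      · refine ⟨j2, by omega, hj2b, ?_⟩
        show max (pvGapsMax cafes lo ((lo + hi) / 2)) (pvGapsMax cafes ((lo + hi) / 2) hi) = _
        rw [hc, hj2]

-- pvGapsMax bounds every gap of its range
theorem pv_gapsMax_le (cafes : List Int) (d : Nat) :
    ∀ lo hi j, hi - lo ≤ d → lo ≤ j → j < hi →
      pvGap cafes j ≤ pvGapsMax cafes lo hi := by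
  induction d with
  | zero => intro lo hi j h hj1 hj2; omega
  | succ d ih =>
    intro lo hi j h hj1 hj2
    unfold pvGapsMax
    by_cases hb : hi ≤ lo + 1
    · rw [if_pos hb]
      have : j = lo := by omega
      subst this; exact le_refl _
    · rw [if_neg hb]
      by_cases hj : j < (lo + hi) / 2
      · exact le_trans (ih lo ((lo + hi) / 2) j (by omega) hj1 hj) (le_max_left _ _)
      · exact le_trans (ih ((lo + hi) / 2) hi j (by omega) (by omega) hj2) (le_max_right _ _)

-- the main equality for lists of length ≥ 2: A's fold over lemming distances equals the
-- flat candidate fold (intermediate form shared with B)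
theorem pv_multi_eq (num_holes : Int) (L : List Int) (h2 : 2 ≤ L.length) :
    ((PySem.List.enumerate L 0).map (fun p => pvLemA num_holes L p.1 p.2)).foldl max 0
    = (L.headD 0 :: (num_holes - 1 - L.getLastD 0) ::
        (L.zip L.tail).map (fun p => PySem.Int.floordiv (p.2 - p.1) 2)).foldl max 0 := by
  have hne : L ≠ [] := by intro h; subst h; simp at h2
  have hhead : L.headD 0 = L[0]'(by omega) := by
    cases L with | nil => simp at h2 | cons a t => rfl
  have hlast : L.getLastD 0 = L[L.length - 1]'(by omega) := by
    rw [List.getLastD_eq_getLast?, List.getLast?_eq_some_getLast (h := hne), Option.getD_some, List.getLast_eq_getElem]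
  set cands : List Int := L.headD 0 :: (num_holes - 1 - L.getLastD 0) ::
      (L.zip L.tail).map (fun p => PySem.Int.floordiv (p.2 - p.1) 2) with hcands
  apply le_antisymm
  · -- A ≤ candidates : every lemming distance is bounded by some candidate
    apply pv_foldl_max_le _ _ _ (PySem.List.le_foldl_max cands 0).1
    intro x hx
    rcases List.mem_map.1 hx with ⟨p, hp, hfx⟩
    rcases (PySem.List.mem_enumerate_iff L 0 p).1 hp with ⟨k, hk, hpk⟩
    subst hpk
    simp only [zero_add] at hfx
    have hle := (PySem.List.le_foldl_max cands 0).2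
    rw [← hfx, pv_lemA_eq num_holes L k h2 hk]
    split_ifs with h0 hl
    · subst h0
      apply max_le
      · exact hle _ (by
          rw [hcands]
          exact List.mem_cons_of_mem _ (List.mem_cons_of_mem _ (pv_gap_mem L 0 (by omega))))
      · exact hle _ (by rw [hcands, hhead]; exact List.mem_cons_self)
    · apply max_le
      · have := pv_gap_mem L (k-1) (by omega)
        simp only [show k - 1 + 1 = k from by omega] at this
        exact hle _ (List.mem_cons_of_mem _ (List.mem_cons_of_mem _ this))
      · simp only [hl]
        exact hle _ (by rw [hcands, hlast]; exact List.mem_cons_of_mem _ List.mem_cons_self)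
    · apply max_le
      · have := pv_gap_mem L (k-1) (by omega)
        simp only [show k - 1 + 1 = k from by omega] at this
        exact hle _ (List.mem_cons_of_mem _ (List.mem_cons_of_mem _ this))
      · exact hle _ (List.mem_cons_of_mem _ (List.mem_cons_of_mem _ (pv_gap_mem L k (by omega))))
  · -- candidates ≤ A : every candidate is bounded by some lemming distance
    set lems : List Int := (PySem.List.enumerate L 0).map
      (fun p => pvLemA num_holes L p.1 p.2) with hlems
    have hle := (PySem.List.le_foldl_max lems 0).2
    have hmem : ∀ (k : Nat) (hk : k < L.length),
        pvLemA num_holes L (k : Int) (L[k]'hk) ∈ lems := by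
      intro k hk
      rw [hlems]
      refine List.mem_map.2 ⟨((k : Int), L[k]), ?_, rfl⟩
      exact (PySem.List.mem_enumerate_iff L 0 _).2 ⟨k, hk, by simp⟩
    apply pv_foldl_max_le _ _ _ (PySem.List.le_foldl_max lems 0).1
    intro x hx
    rcases List.mem_cons.1 hx with hx0 | hx
    · -- first candidate: cafes[0]
      have h := hle _ (hmem 0 (by omega))
      rw [pv_lemA_eq num_holes L 0 h2 (by omega), if_pos rfl] at h
      rw [hx0, hhead]
      exact le_trans (le_max_right _ _) h
    rcases List.mem_cons.1 hx with hx1 | hxg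
    · -- second candidate: num_holes - 1 - cafes[-1]
      have hk : L.length - 1 < L.length := by omega
      have h := hle _ (hmem (L.length - 1) hk)
      rw [pv_lemA_eq num_holes L (L.length - 1) h2 hk] at h
      rw [if_neg (by omega), dif_pos rfl] at h
      rw [hx1, hlast]
      exact le_trans (le_max_right _ _) h
    · -- a half-gap candidate
      rcases pv_gap_mem_inv L x hxg with ⟨j, hj, hxj⟩
      have h := hle _ (hmem (j + 1) hj)
      rw [pv_lemA_eq num_holes L (j + 1) h2 hj] at h
      rw [if_neg (by omega)] at h
      subst hxj
      by_cases hl : j + 1 = L.length - 1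
      · rw [dif_pos hl] at h
        simpa using le_trans (le_max_left _ _) h
      · rw [dif_neg hl] at h
        simpa using le_trans (le_max_left _ _) h

-- the flat candidate fold equals B's divide-and-conquer expression (length ≥ 2)
theorem pv_B_eq (num_holes : Int) (L : List Int) (h2 : 2 ≤ L.length) :
    (L.headD 0 :: (num_holes - 1 - L.getLastD 0) ::
        (L.zip L.tail).map (fun p => PySem.Int.floordiv (p.2 - p.1) 2)).foldl max 0
    = max 0 (max (L.headD 0)
        (max (pvGapsMax L 0 (L.length - 1)) (num_holes - 1 - L.getLastD 0))) := by
  set cands : List Int := L.headD 0 :: (num_holes - 1 - L.getLastD 0) ::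
      (L.zip L.tail).map (fun p => PySem.Int.floordiv (p.2 - p.1) 2) with hcands
  apply le_antisymm
  · apply pv_foldl_max_le _ _ _ (le_max_left _ _)
    intro x hx
    rcases List.mem_cons.1 hx with hx0 | hx
    · rw [hx0]; exact le_trans (le_max_left _ _) (le_max_right _ _)
    rcases List.mem_cons.1 hx with hx1 | hxg
    · rw [hx1]
      exact le_trans (le_trans (le_max_right _ _) (le_max_right _ _)) (le_max_right _ _)
    · rcases pv_gap_mem_inv L x hxg with ⟨j, hj, hxj⟩
      have hg : x = pvGap L j := by rw [hxj, pv_gap_eq L j hj]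
      have h1 : pvGap L j ≤ pvGapsMax L 0 (L.length - 1) :=
        pv_gapsMax_le L (L.length - 1) 0 (L.length - 1) j (by omega) (by omega) (by omega)
      rw [hg]
      exact le_trans (le_trans (le_trans h1 (le_max_left _ _)) (le_max_right _ _)) (le_max_right _ _)
  · have hle := (PySem.List.le_foldl_max cands 0).2
    apply max_le (PySem.List.le_foldl_max cands 0).1
    apply max_le (hle _ List.mem_cons_self)
    apply max_le
    · rcases pv_gapsMax_exists L (L.length - 1) 0 (L.length - 1) (by omega) (by omega)
        with ⟨j, _, hjb, hjeq⟩
      have hj : j + 1 < L.length := by omega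
      rw [hjeq, pv_gap_eq L j hj]
      exact hle _ (List.mem_cons_of_mem _ (List.mem_cons_of_mem _ (pv_gap_mem L j hj)))
    · exact hle _ (List.mem_cons_of_mem _ List.mem_cons_self)

-- ===== VERDICT (by name: the statement is the Claim_ definition above) =====
theorem furthest_optimized_spec : Claim_equal_furthest_optimized := by
  intro num_holes cafes _
  unfold Spec_furthest_optimized furthest_optimized furthest_optimized_alt
  match cafes with
  | [] => simp [PySem.List.enumerate]
  | [c] =>
    simp only [List.length_cons, List.length_nil, Nat.zero_add, beq_self_eq_true, if_true,
      List.isEmpty_cons, Bool.false_eq_true, if_false, List.headD_cons,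
      PySem.List.pyGetD_zero_cons]
    split_ifs <;> omega
  | c0 :: c1 :: rest =>
    have h2 : 2 ≤ (c0 :: c1 :: rest).length := by simp
    have hlen : ((c0 :: c1 :: rest).length == 1) = false := by simp
    rw [hlen]
    simp only [Bool.false_eq_true, if_false, List.isEmpty_cons]
    rw [pv_foldA_eq, pv_multi_eq num_holes _ h2, pv_B_eq num_holes _ h2]
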